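-- pv_equiv track=rewrite | github.com/feeka/mt_dna_as_storage | ecc/encoder.py | __construct_generator_matrix
-- ===== SOURCE A (Python) =====
-- def __construct_generator_matrix(msg_length,polynom):
-- 	generator_matrix = []
-- 	for i in range(msg_length):
-- 		generator_matrix.append(polynom)
-- 	g_m =[]
-- 	for i in range(len(generator_matrix)):
-- 		g_m.append([0]*i + generator_matrix[i] + [0]*(msg_length-i-1))
-- 	return g_m
-- ===== SOURCE B (Python) =====
-- def __construct_generator_matrix(msg_length, polynom):
-- 	rows = []
-- 	row = polynom + [0] * (msg_length - 1)
-- 	for _ in range(msg_length):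
-- 		rows.append(row)
-- 		row = [0] + row[:-1]
-- 	return rows
-- ===== Notes on version B (the rewrite author's own statement) =====
-- stated objective: alternative
-- what changed: Each row is derived from the previous one by an incremental shift ([0] + row[:-1]) starting from polynom + [0]*(msg_length-1), instead of assembling every row independently from three freshly built pieces [0]*i + polynom + [0]*(m-i-1) after first materialising a list of msg_length copies of the polynomial.
import Mathlib
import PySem

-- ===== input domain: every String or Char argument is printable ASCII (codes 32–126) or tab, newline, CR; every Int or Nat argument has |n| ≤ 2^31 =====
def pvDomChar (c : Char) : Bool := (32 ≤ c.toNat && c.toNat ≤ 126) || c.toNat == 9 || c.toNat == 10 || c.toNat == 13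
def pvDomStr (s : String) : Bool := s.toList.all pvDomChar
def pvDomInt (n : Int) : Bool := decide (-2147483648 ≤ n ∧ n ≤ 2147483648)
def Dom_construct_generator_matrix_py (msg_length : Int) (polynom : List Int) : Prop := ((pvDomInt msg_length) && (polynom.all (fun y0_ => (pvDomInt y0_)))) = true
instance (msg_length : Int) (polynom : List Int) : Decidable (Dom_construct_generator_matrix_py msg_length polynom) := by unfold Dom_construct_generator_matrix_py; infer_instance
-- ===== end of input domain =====

-- B derives each row from the previous one by an incremental shift ([0] + row[:-1])
-- instead of assembling every row independently from three fresh pieces (alternative algorithm, same cost).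


-- ===== PORT A =====
def construct_generator_matrix_py (msg_length : Int) (polynom : List Int) : List (List Int) :=
  let generator_matrix : List (List Int) :=
    (PySem.List.pyRange 0 msg_length 1).foldl (fun acc _ => acc ++ [polynom]) []
  (PySem.List.pyRange 0 (generator_matrix.length : Int) 1).foldl
    (fun g_m i =>
      g_m ++ [List.replicate i.toNat (0 : Int) ++ PySem.List.pyGetD generator_matrix i []
                ++ List.replicate (msg_length - i - 1).toNat (0 : Int)])
    []

-- ===== PORT B =====
def construct_generator_matrix_py_alt (msg_length : Int) (polynom : List Int) : List (List Int) :=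
  let init : List (List Int) × List Int :=
    ([], polynom ++ List.replicate (msg_length - 1).toNat (0 : Int))
  ((PySem.List.pyRange 0 msg_length 1).foldl
      (fun st _ => (st.1 ++ [st.2], [(0 : Int)] ++ PySem.List.slice st.2 none (some (-1))))
      init).1

-- ===== PRECONDITION & SPEC =====
def Spec_construct_generator_matrix_py (msg_length : Int) (polynom : List Int) (out : List (List Int)) : Prop := out = construct_generator_matrix_py_alt msg_length polynom
instance (msg_length : Int) (polynom : List Int) (out : List (List Int)) : Decidable (Spec_construct_generator_matrix_py msg_length polynom out) := by unfold Spec_construct_generator_matrix_py; infer_instance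

-- ===== CLAIM (what is proved, stated in full; the proofs are below) =====
def Claim_equal_construct_generator_matrix_py : Prop := ∀ (msg_length : Int) (polynom : List Int), Dom_construct_generator_matrix_py msg_length polynom → Spec_construct_generator_matrix_py msg_length polynom (construct_generator_matrix_py msg_length polynom)

-- ===== LEMMAS AND PROOFS =====

/-- the i-th row of the intended matrix with n = msg_length rows -/
def pvRowOf (n : Nat) (p : List Int) (i : Nat) : List Int :=
  List.replicate i (0 : Int) ++ p ++ List.replicate (n - 1 - i) (0 : Int)

lemma pv_shift_row (n : Nat) (p : List Int) (k : Nat) (h : k + 2 ≤ n) :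
    (0 : Int) :: (pvRowOf n p k).dropLast = pvRowOf n p (k + 1) := by
  have h1 : n - 1 - k = (n - 2 - k) + 1 := by omega
  have h2 : n - 1 - (k + 1) = n - 2 - k := by omega
  simp [pvRowOf, h1, h2, List.replicate_succ' (n := n - 2 - k),
    ← List.append_assoc, List.replicate_succ]

lemma pv_B_loop (n : Nat) (p : List Int) (l : List Int) (acc : List (List Int)) (k : Nat)
    (h : k + l.length ≤ n) :
    (l.foldl (fun st _ => (st.1 ++ [st.2], [(0 : Int)] ++ PySem.List.slice st.2 none (some (-1))))
        (acc, pvRowOf n p k)).1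
      = acc ++ (List.range l.length).map (fun t => pvRowOf n p (k + t)) := by
  induction l generalizing acc k with
  | nil => simp
  | cons x xs ih =>
    simp only [List.foldl_cons, PySem.List.slice_to_neg_one] at ih ⊢
    cases xs with
    | nil => simp
    | cons y ys =>
      have hk2 : k + 2 ≤ n := by simp at h; omega
      rw [show ([(0 : Int)] ++ (pvRowOf n p k).dropLast) = pvRowOf n p (k + 1) from by
            simpa using pv_shift_row n p k hk2]
      rw [ih (acc ++ [pvRowOf n p k]) (k + 1) (by simp at h ⊢; omega)]
      simp [List.range_succ_eq_map, List.append_assoc, Function.comp_def]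
      intro a _
      congr 1
      omega

lemma pv_alt_eq (msg_length : Int) (polynom : List Int) :
    construct_generator_matrix_py_alt msg_length polynom
      = (List.range msg_length.toNat).map (fun i => pvRowOf msg_length.toNat polynom i) := by
  unfold construct_generator_matrix_py_alt
  rcases le_or_gt msg_length 0 with hm | hm
  · simp [PySem.List.pyRange_one_eq_nil hm, Int.toNat_of_nonpos hm]
  · have hn : 0 < msg_length.toNat := by omega
    have hrow : polynom ++ List.replicate (msg_length - 1).toNat (0 : Int)
        = pvRowOf msg_length.toNat polynom 0 := by
      simp only [pvRowOf, List.replicate_zero, List.nil_append, Nat.sub_zero]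
      congr 2
      omega
    simp only [hrow]
    rw [pv_B_loop msg_length.toNat polynom _ [] 0
        (by simp [PySem.List.length_pyRange_one])]
    simp [PySem.List.length_pyRange_one]

lemma pv_A_eq (msg_length : Int) (polynom : List Int) :
    construct_generator_matrix_py msg_length polynom
      = (List.range msg_length.toNat).map (fun i => pvRowOf msg_length.toNat polynom i) := by
  unfold construct_generator_matrix_py
  have hgm : (PySem.List.pyRange 0 msg_length 1).foldl (fun acc _ => acc ++ [polynom]) []
      = List.replicate msg_length.toNat polynom := by
    rw [PySem.List.foldl_append_singleton_eq_map]
    simp [List.map_const', PySem.List.length_pyRange_one]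
  rw [hgm]
  rw [PySem.List.foldl_append_singleton_eq_map]
  simp only [List.length_replicate, PySem.List.pyRange_zero_nat, List.map_map]
  apply List.map_congr_left
  intro k hk
  simp only [List.mem_range] at hk
  simp only [Function.comp_def, pvRowOf, PySem.List.pyGetD_natCast]
  have h1 : ((k : Int)).toNat = k := by omega
  have h2 : (msg_length - (k : Int) - 1).toNat = msg_length.toNat - 1 - k := by omega
  rw [h1, h2]
  congr 2
  simp [List.getD, hk]

-- ===== VERDICT (by name: the statement is the Claim_ definition above) =====
theorem construct_generator_matrix_py_spec : Claim_equal_construct_generator_matrix_py := by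
  intro msg_length polynom _
  unfold Spec_construct_generator_matrix_py
  rw [pv_A_eq, pv_alt_eq]
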